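-- pv_equiv track=rewrite | github.com/debashishroy00/lmod | src/agents/cobol/cobol_io_agent.py | _has_sequential_read_loop
-- ===== SOURCE A (Python) =====
-- from typing import Dict, List, Optional, Tuple
--
-- def _has_sequential_read_loop(operations: List[Dict]) -> bool:
--     """Check if operations contain sequential read loop pattern."""
--     has_input_open = any(
--         op.get("type") == "OPEN" and op.get("mode") == "INPUT"
--         for op in operations
--     )
--
--     has_sequential_read = any(
--         op.get("type") == "READ" and
--         op.get("access_pattern") == "SEQUENTIAL" and
--         op.get("error_handling") is not None
--         for op in operations
--     )
--
--     return has_input_open and has_sequential_read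
-- ===== SOURCE B (Python) =====
-- from typing import Dict, List
--
--
-- def _classify(op: Dict) -> int:
--     """Encode which of the two patterns this single operation exhibits as a 2-bit mask."""
--     code = 0
--     if op.get("type") == "OPEN" and op.get("mode") == "INPUT":
--         code |= 1
--     if (op.get("type") == "READ"
--             and op.get("access_pattern") == "SEQUENTIAL"
--             and op.get("error_handling") is not None):
--         code |= 2
--     return code
--
--
-- def _has_sequential_read_loop(operations: List[Dict]) -> bool:
--     """Map each operation to its pattern bitmask, OR-reduce, and test for the full mask 3."""
--     mask = 0
--     for code in map(_classify, operations):
--         mask |= code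
--     return mask == 3
-- ===== Notes on version B (the rewrite author's own statement) =====
-- stated objective: alternative
-- what changed: Replaced A's two independent existence scans (any) by a map/OR-reduce over a per-operation 2-bit pattern bitmask, returning whether the reduced mask equals 3.
import Mathlib
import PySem

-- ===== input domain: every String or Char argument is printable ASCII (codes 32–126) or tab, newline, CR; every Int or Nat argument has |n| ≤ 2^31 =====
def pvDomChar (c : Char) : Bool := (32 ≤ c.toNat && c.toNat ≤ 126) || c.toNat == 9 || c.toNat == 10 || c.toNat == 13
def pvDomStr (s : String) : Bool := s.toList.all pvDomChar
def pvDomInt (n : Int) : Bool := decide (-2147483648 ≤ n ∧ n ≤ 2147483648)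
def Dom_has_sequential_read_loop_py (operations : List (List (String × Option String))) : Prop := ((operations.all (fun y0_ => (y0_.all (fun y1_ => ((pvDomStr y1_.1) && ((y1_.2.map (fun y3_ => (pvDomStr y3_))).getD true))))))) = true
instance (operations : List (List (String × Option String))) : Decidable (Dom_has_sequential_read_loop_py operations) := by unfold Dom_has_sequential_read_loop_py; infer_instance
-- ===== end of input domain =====

-- B replaces A's two independent any() scans by a map/OR-reduce: each operation
-- is classified once into a 2-bit pattern mask, the masks are OR-folded and the
-- result compared with 3 (objective: alternative decomposition; same return value).

-- op.get(k): first-match lookup in the association list; a stored None and a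
-- missing key both read back as `none` (exact for Python dicts whose values
-- here are strings or None).
def pvGet (op : List (String × Option String)) (k : String) : Option String :=
  ((PySem.Dict.mk op).get? k).getD none

-- ===== PORT A =====
def has_sequential_read_loop_py (operations : List (List (String × Option String))) : Bool :=
  let has_input_open := operations.any (fun op =>
    pvGet op "type" == some "OPEN" && pvGet op "mode" == some "INPUT")
  let has_sequential_read := operations.any (fun op =>
    pvGet op "type" == some "READ" &&
    pvGet op "access_pattern" == some "SEQUENTIAL" &&
    pvGet op "error_handling" != none)
  has_input_open && has_sequential_read

-- ===== PORT B =====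
-- _classify: which of the two patterns this operation exhibits, as a 2-bit mask
def classify (op : List (String × Option String)) : Nat :=
  let code := 0
  let code := if pvGet op "type" == some "OPEN" && pvGet op "mode" == some "INPUT"
              then code ||| 1 else code
  let code := if pvGet op "type" == some "READ" &&
                 pvGet op "access_pattern" == some "SEQUENTIAL" &&
                 pvGet op "error_handling" != none
              then code ||| 2 else code
  code

def has_sequential_read_loop_py_alt (operations : List (List (String × Option String))) : Bool :=
  ((operations.map classify).foldl (fun mask code => mask ||| code) 0) == 3

-- ===== PRECONDITION & SPEC =====
def Spec_has_sequential_read_loop_py (operations : List (List (String × Option String))) (out : Bool) : Prop := out = has_sequential_read_loop_py_alt operations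
instance (operations : List (List (String × Option String))) (out : Bool) : Decidable (Spec_has_sequential_read_loop_py operations out) := by unfold Spec_has_sequential_read_loop_py; infer_instance

-- ===== CLAIM =====
def Claim_equal_has_sequential_read_loop_py : Prop := ∀ (operations : List (List (String × Option String))), Dom_has_sequential_read_loop_py operations → Spec_has_sequential_read_loop_py operations (has_sequential_read_loop_py operations)

-- ===== LEMMAS AND PROOFS =====

-- the two per-operation predicates, as A scans for them
def openCond (op : List (String × Option String)) : Bool :=
  pvGet op "type" == some "OPEN" && pvGet op "mode" == some "INPUT"

def readCond (op : List (String × Option String)) : Bool :=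
  pvGet op "type" == some "READ" &&
  pvGet op "access_pattern" == some "SEQUENTIAL" &&
  pvGet op "error_handling" != none

-- the mask the whole list denotes
def maskOf (ops : List (List (String × Option String))) : Nat :=
  (if ops.any openCond then 1 else 0) ||| (if ops.any readCond then 2 else 0)

theorem classify_eq (op : List (String × Option String)) :
    classify op = (if openCond op then 1 else 0) ||| (if readCond op then 2 else 0) := by
  unfold classify openCond readCond
  cases h1 : (pvGet op "type" == some "OPEN" && pvGet op "mode" == some "INPUT") <;>
  cases h2 : (pvGet op "type" == some "READ" &&
              pvGet op "access_pattern" == some "SEQUENTIAL" &&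
              pvGet op "error_handling" != none) <;>
  simp [h1]

-- fold invariant: OR-folding the classifications onto m yields m ||| maskOf ops
theorem fold_classify (ops : List (List (String × Option String))) :
    ∀ m : Nat, (ops.map classify).foldl (fun mask code => mask ||| code) m = m ||| maskOf ops := by
  induction ops with
  | nil => intro m; simp [maskOf]
  | cons op rest ih =>
    intro m
    simp only [List.map_cons, List.foldl_cons, ih, classify_eq, Nat.or_assoc]
    congr 1
    unfold maskOf
    cases h1 : openCond op <;> cases h2 : readCond op <;>
      cases h3 : rest.any openCond <;> cases h4 : rest.any readCond <;>
      simp [h1, h2, h3, h4, List.any_cons]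

-- ===== VERDICT =====
theorem has_sequential_read_loop_py_spec : Claim_equal_has_sequential_read_loop_py := by
  intro operations _
  unfold Spec_has_sequential_read_loop_py has_sequential_read_loop_py has_sequential_read_loop_py_alt
  rw [fold_classify _ 0, Nat.zero_or]
  unfold maskOf
  cases h1 : operations.any openCond <;> cases h2 : operations.any readCond <;>
    simp_all [openCond, readCond]
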